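-- pv_equiv track=rewrite | github.com/maxoja/web-sci-coursework | 04-interaction.py | ties_count
-- ===== SOURCE A (Python) =====
-- def ties_count(links):
--     count_first = 0
--     count_second = 0
--     found_first = set()
--     found_second = set()
--
--     for u in links:
--         for _v in links[u]:
--             v = _v[0]
--             if v in links and u in map(lambda x: x[0], links[v]): # second order
--                 if (u,v) in found_second or (v,u) in found_second:
--                     continue
--                 found_second.add((u,v))
--                 found_second.add((v,u))
--                 count_second += 1
--             else:
--                 if (u,v) in found_first or (v,u) in found_first:
--                     continue
--                 found_first.add((u,v))
--                 count_first += 1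
--     return count_first, count_second
-- ===== SOURCE B (Python) =====
-- def ties_count(links):
--     edges = {(u, e[0]) for u in links for e in links[u]}
--     recip = {(u, v) for (u, v) in edges if (v, u) in edges}
--     loops = sum(1 for (u, v) in recip if u == v)
--     return len(edges) - len(recip), (len(recip) + loops) // 2
-- ===== Notes on version B (the rewrite author's own statement) =====
-- stated objective: simpler
-- what changed: A's interleaved per-edge branching with two dedup sets is replaced by one edge-set pre-pass, a reciprocal-edge filter, and closed-form counts: count_first = |edges| - |recip| and count_second = (|recip| + #self-loops)//2.
import Mathlib
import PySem

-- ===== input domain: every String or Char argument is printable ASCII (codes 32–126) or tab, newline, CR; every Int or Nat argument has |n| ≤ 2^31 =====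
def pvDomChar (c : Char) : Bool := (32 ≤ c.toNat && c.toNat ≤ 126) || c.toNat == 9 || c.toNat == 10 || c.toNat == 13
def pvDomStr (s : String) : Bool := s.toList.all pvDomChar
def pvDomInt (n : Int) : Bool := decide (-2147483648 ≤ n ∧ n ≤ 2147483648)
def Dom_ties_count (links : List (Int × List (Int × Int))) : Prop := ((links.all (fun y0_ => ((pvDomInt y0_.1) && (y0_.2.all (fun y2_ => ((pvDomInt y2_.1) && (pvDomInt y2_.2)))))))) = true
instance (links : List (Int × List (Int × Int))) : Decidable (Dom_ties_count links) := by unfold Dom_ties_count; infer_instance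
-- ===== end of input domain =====

-- B replaces A's per-edge branching and two dedup sets by one edge-set pre-pass, a reciprocal
-- filter, and closed-form counts (subtraction and a halved sum); return value only, no mutation.

-- ===== PORT A =====
-- A-side helper: the body of A's inner loop; state = (count_first, count_second, found_first, found_second)
def tcStepA (d : PySem.Dict Int (List (Int × Int)))
    (st : Int × Int × PySem.Set (Int × Int) × PySem.Set (Int × Int)) (p : Int × Int) :
    Int × Int × PySem.Set (Int × Int) × PySem.Set (Int × Int) :=
  let u := p.1
  let v := p.2
  let cf := st.1
  let cs := st.2.1
  let ff := st.2.2.1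
  let fs := st.2.2.2
  if d.contains v && ((d.getD v []).map (fun x => x.1)).contains u then -- second order
    if fs.contains (u, v) || fs.contains (v, u) then st
    else (cf, cs + 1, ff, PySem.Set.add (PySem.Set.add fs (u, v)) (v, u))
  else
    if ff.contains (u, v) || ff.contains (v, u) then st
    else (cf + 1, cs, PySem.Set.add ff (u, v), fs)

def ties_count (links : List (Int × List (Int × Int))) : Int × Int :=
  let d := PySem.Dict.ofList links
  let st := d.keys.foldl (fun st u =>
      (d.getD u []).foldl (fun st _v => tcStepA d st (u, _v.1)) st)
    (0, 0, PySem.Set.empty, PySem.Set.empty)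
  (st.1, st.2.1)

-- ===== PORT B =====
def ties_count_alt (links : List (Int × List (Int × Int))) : Int × Int :=
  let d := PySem.Dict.ofList links
  let edges : PySem.Set (Int × Int) :=
    PySem.Set.ofList (d.keys.flatMap (fun u => (d.getD u []).map (fun e => (u, e.1))))
  let recip : PySem.Set (Int × Int) := edges.filter (fun p => PySem.Set.contains edges (p.2, p.1))
  let loops : Int := ((recip.filter (fun p => p.1 == p.2)).length : Int)
  ((edges.length : Int) - (recip.length : Int),
   PySem.Int.floordiv ((recip.length : Int) + loops) 2)

-- ===== PRECONDITION & SPEC =====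
def Spec_ties_count (links : List (Int × List (Int × Int))) (out : Int × Int) : Prop := out = ties_count_alt links
instance (links : List (Int × List (Int × Int))) (out : Int × Int) : Decidable (Spec_ties_count links out) := by unfold Spec_ties_count; infer_instance

-- ===== CLAIM (what is proved, stated in full; the proofs are below) =====
def Claim_equal_ties_count : Prop := ∀ (links : List (Int × List (Int × Int))), Dom_ties_count links → Spec_ties_count links (ties_count links)

-- ===== LEMMAS AND PROOFS =====

-- the list of directed edges (u, v) in processing order
def tcEs (links : List (Int × List (Int × Int))) : List (Int × Int) :=
  let d := PySem.Dict.ofList links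
  d.keys.flatMap (fun u => (d.getD u []).map (fun e => (u, e.1)))

-- A's second-order test for edge (u, v) is exactly "(v, u) is an edge"
lemma tcTest_eq (links : List (Int × List (Int × Int))) (u v : Int) :
    ((PySem.Dict.ofList links).contains v &&
      (((PySem.Dict.ofList links).getD v []).map (fun x => x.1)).contains u)
    = decide ((v, u) ∈ tcEs links) := by
  rw [Bool.eq_iff_iff]
  simp [tcEs, PySem.Dict.contains_iff_mem_keys]

-- loop invariant: after processing the prefix `seen` of the edge list `es`,
-- ff is the set of distinct non-reciprocal edges seen, cf its size,
-- fs is the symmetric closure of the reciprocal edges seen, and 2·cs = |fs| + |diag fs|.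
def tcInv (es seen : List (Int × Int))
    (st : Int × Int × PySem.Set (Int × Int) × PySem.Set (Int × Int)) : Prop :=
  (∀ q : Int × Int, q ∈ st.2.2.1 ↔ q ∈ seen ∧ (q.2, q.1) ∉ es) ∧
  st.2.2.1.Nodup ∧
  st.1 = (st.2.2.1.length : Int) ∧
  (∀ q : Int × Int, q ∈ st.2.2.2 ↔
      ((q ∈ seen ∧ (q.2, q.1) ∈ es) ∨ ((q.2, q.1) ∈ seen ∧ q ∈ es))) ∧
  st.2.2.2.Nodup ∧
  2 * st.2.1 = (st.2.2.2.length : Int) +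
      ((st.2.2.2.filter (fun q => q.1 == q.2)).length : Int)

lemma tcStep_inv (links : List (Int × List (Int × Int))) (seen : List (Int × Int))
    (p : Int × Int) (st : Int × Int × PySem.Set (Int × Int) × PySem.Set (Int × Int))
    (hp : p ∈ tcEs links) (hseen : ∀ q ∈ seen, q ∈ tcEs links)
    (h : tcInv (tcEs links) seen st) :
    tcInv (tcEs links) (seen ++ [p]) (tcStepA (PySem.Dict.ofList links) st p) := by
  obtain ⟨hff, hffnd, hcf, hfs, hfsnd, hcs⟩ := h
  obtain ⟨cf, cs, ff, fs⟩ := st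
  obtain ⟨u, v⟩ := p
  simp only at hff hcf hfs hcs hffnd hfsnd
  unfold tcStepA
  simp only [tcTest_eq links u v]
  by_cases hR : (v, u) ∈ tcEs links
  · -- second-order branch
    simp only [hR, decide_true, if_true]
    by_cases hmem : (fs.contains (u, v) || fs.contains (v, u)) = true
    · -- already counted: state unchanged
      rw [if_pos hmem]
      have hmem' : (u, v) ∈ fs ∨ (v, u) ∈ fs := by
        simpa [PySem.Set.contains] using hmem
      have hboth : (u, v) ∈ fs ∧ (v, u) ∈ fs := by
        rcases hmem' with hq | hq
        · refine ⟨hq, ?_⟩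
          rcases (hfs (u, v)).mp hq with ⟨hs, _⟩ | ⟨hs, _⟩
          · exact (hfs (v, u)).mpr (Or.inr ⟨hs, hR⟩)
          · exact (hfs (v, u)).mpr (Or.inl ⟨hs, hp⟩)
        · refine ⟨?_, hq⟩
          rcases (hfs (v, u)).mp hq with ⟨hs, _⟩ | ⟨hs, _⟩
          · exact (hfs (u, v)).mpr (Or.inr ⟨hs, hp⟩)
          · exact (hfs (u, v)).mpr (Or.inl ⟨hs, hR⟩)
      refine ⟨?_, hffnd, hcf, ?_, hfsnd, hcs⟩
      · rintro ⟨a, b⟩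
        rw [hff (a, b)]
        constructor
        · rintro ⟨hq, hnR⟩; exact ⟨by simp [hq], hnR⟩
        · rintro ⟨hq, hnR⟩
          rcases List.mem_append.mp hq with hq | hq
          · exact ⟨hq, hnR⟩
          · obtain ⟨rfl, rfl⟩ : a = u ∧ b = v := by simpa [Prod.ext_iff] using hq
            exact absurd hR hnR
      · rintro ⟨a, b⟩
        rw [hfs (a, b)]
        constructor
        · rintro (⟨hq, hr⟩ | ⟨hq, hr⟩)
          · exact Or.inl ⟨by simp [hq], hr⟩
          · exact Or.inr ⟨by simp [hq], hr⟩
        · rintro (⟨hq, hr⟩ | ⟨hq, hr⟩)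
          · rcases List.mem_append.mp hq with hq | hq
            · exact Or.inl ⟨hq, hr⟩
            · obtain ⟨rfl, rfl⟩ : a = u ∧ b = v := by simpa [Prod.ext_iff] using hq
              exact (hfs (a, b)).mp hboth.1
          · rcases List.mem_append.mp hq with hq | hq
            · exact Or.inr ⟨hq, hr⟩
            · obtain ⟨rfl, rfl⟩ : b = u ∧ a = v := by simpa [Prod.ext_iff] using hq
              exact (hfs (a, b)).mp hboth.2
    · -- new reciprocal pair
      rw [if_neg hmem]
      have hpnot : (u, v) ∉ fs ∧ (v, u) ∉ fs := by
        constructor <;> intro hq <;>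
          exact hmem (by simp [PySem.Set.contains, hq])
      by_cases hd : u = v
      · -- self-loop
        subst hd
        have hfs1 : PySem.Set.add fs (u, u) = fs ++ [(u, u)] := by
          simp [PySem.Set.add, PySem.Set.contains, hpnot.1]
        have hfs2 : PySem.Set.add (fs ++ [(u, u)]) (u, u) = fs ++ [(u, u)] := by
          simp [PySem.Set.add, PySem.Set.contains]
        rw [hfs1, hfs2]
        refine ⟨?_, hffnd, hcf, ?_, ?_, ?_⟩
        · rintro ⟨a, b⟩
          rw [hff (a, b)]
          constructor
          · rintro ⟨hq, hnR⟩; exact ⟨by simp [hq], hnR⟩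
          · rintro ⟨hq, hnR⟩
            rcases List.mem_append.mp hq with hq | hq
            · exact ⟨hq, hnR⟩
            · obtain ⟨rfl, rfl⟩ : a = u ∧ b = u := by simpa [Prod.ext_iff] using hq
              exact absurd hR hnR
        · rintro ⟨a, b⟩
          simp only [List.mem_append, List.mem_singleton, hfs (a, b)]
          constructor
          · rintro ((⟨hq, hr⟩ | ⟨hq, hr⟩) | hq)
            · exact Or.inl ⟨Or.inl hq, hr⟩
            · exact Or.inr ⟨Or.inl hq, hr⟩
            · obtain ⟨rfl, rfl⟩ : a = u ∧ b = u := by simpa [Prod.ext_iff] using hq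
              exact Or.inl ⟨Or.inr rfl, hR⟩
          · rintro (⟨hq, hr⟩ | ⟨hq, hr⟩)
            · rcases hq with hq | hq
              · exact Or.inl (Or.inl ⟨hq, hr⟩)
              · exact Or.inr hq
            · rcases hq with hq | hq
              · exact Or.inl (Or.inr ⟨hq, hr⟩)
              · obtain ⟨rfl, rfl⟩ : b = u ∧ a = u := by simpa [Prod.ext_iff] using hq
                exact Or.inr rfl
        · exact List.Nodup.append hfsnd (List.nodup_singleton _)
            (by simpa using hpnot.1)
        · simp only [List.filter_append, List.length_append]
          have hf1 : (List.filter (fun q : Int × Int => q.1 == q.2) [(u, u)]) = [(u, u)] := by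
            simp
          rw [hf1]
          simp only [List.length_singleton]
          push_cast
          omega
      · -- proper pair
        have hfs1 : PySem.Set.add fs (u, v) = fs ++ [(u, v)] := by
          simp [PySem.Set.add, PySem.Set.contains, hpnot.1]
        have hfs2 : PySem.Set.add (fs ++ [(u, v)]) (v, u) = fs ++ [(u, v)] ++ [(v, u)] := by
          simp only [PySem.Set.add, PySem.Set.contains]
          rw [if_neg ?side]
          case side =>
            simp only [List.contains_iff_mem, List.mem_append, List.mem_singleton]
            rintro (h' | h')
            · exact hpnot.2 h'
            · obtain ⟨h1, h2⟩ : v = u ∧ u = v := by simpa [Prod.ext_iff] using h'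
              exact hd h2
        rw [hfs1, hfs2]
        refine ⟨?_, hffnd, hcf, ?_, ?_, ?_⟩
        · rintro ⟨a, b⟩
          rw [hff (a, b)]
          constructor
          · rintro ⟨hq, hnR⟩; exact ⟨by simp [hq], hnR⟩
          · rintro ⟨hq, hnR⟩
            rcases List.mem_append.mp hq with hq | hq
            · exact ⟨hq, hnR⟩
            · obtain ⟨rfl, rfl⟩ : a = u ∧ b = v := by simpa [Prod.ext_iff] using hq
              exact absurd hR hnR
        · rintro ⟨a, b⟩
          simp only [List.append_assoc, List.mem_append, List.mem_singleton, hfs (a, b)]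
          constructor
          · rintro ((⟨hq, hr⟩ | ⟨hq, hr⟩) | (hq | hq))
            · exact Or.inl ⟨Or.inl hq, hr⟩
            · exact Or.inr ⟨Or.inl hq, hr⟩
            · obtain ⟨rfl, rfl⟩ : a = u ∧ b = v := by simpa [Prod.ext_iff] using hq
              exact Or.inl ⟨Or.inr rfl, hR⟩
            · obtain ⟨rfl, rfl⟩ : a = v ∧ b = u := by simpa [Prod.ext_iff] using hq
              exact Or.inr ⟨Or.inr rfl, hR⟩
          · rintro (⟨hq, hr⟩ | ⟨hq, hr⟩)
            · rcases hq with hq | hq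
              · exact Or.inl (Or.inl ⟨hq, hr⟩)
              · exact Or.inr (Or.inl hq)
            · rcases hq with hq | hq
              · exact Or.inl (Or.inr ⟨hq, hr⟩)
              · obtain ⟨rfl, rfl⟩ : b = u ∧ a = v := by simpa [Prod.ext_iff] using hq
                exact Or.inr (Or.inr rfl)
        · refine List.Nodup.append (List.Nodup.append hfsnd (List.nodup_singleton _)
            (by simpa using hpnot.1)) (List.nodup_singleton _) ?_
          rintro ⟨a, b⟩ ha hb
          obtain ⟨rfl, rfl⟩ : a = v ∧ b = u := by simpa [Prod.ext_iff] using hb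
          rcases List.mem_append.mp ha with h' | h'
          · exact hpnot.2 h'
          · obtain ⟨h1, h2⟩ : a = b ∧ b = a := by simpa [Prod.ext_iff] using h'
            exact hd h2
        · simp only [List.append_assoc, List.filter_append, List.length_append]
          have h1 : (List.filter (fun q : Int × Int => q.1 == q.2) [((u : Int), v)]) = [] := by
            simp [hd]
          have h2 : (List.filter (fun q : Int × Int => q.1 == q.2) [((v : Int), u)]) = [] := by
            simp [Ne.symm hd]
          rw [h1, h2]
          simp only [List.length_singleton, List.length_nil]
          push_cast
          omega
  · -- first-order branch
    simp only [hR, decide_false, Bool.false_eq_true, if_false]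
    have hswapff : (v, u) ∉ ff := by
      intro hq
      rcases (hff _).mp hq with ⟨hs, _⟩
      exact hR (hseen _ hs)
    by_cases hmem : (u, v) ∈ ff
    · rw [if_pos (by simp [PySem.Set.contains, hmem])]
      refine ⟨?_, hffnd, hcf, ?_, hfsnd, hcs⟩
      · rintro ⟨a, b⟩
        rw [hff (a, b)]
        constructor
        · rintro ⟨hq, hnR⟩; exact ⟨by simp [hq], hnR⟩
        · rintro ⟨hq, hnR⟩
          rcases List.mem_append.mp hq with hq | hq
          · exact ⟨hq, hnR⟩
          · obtain ⟨rfl, rfl⟩ : a = u ∧ b = v := by simpa [Prod.ext_iff] using hq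
            exact (hff (a, b)).mp hmem
      · rintro ⟨a, b⟩
        rw [hfs (a, b)]
        constructor
        · rintro (⟨hq, hr⟩ | ⟨hq, hr⟩)
          · exact Or.inl ⟨by simp [hq], hr⟩
          · exact Or.inr ⟨by simp [hq], hr⟩
        · rintro (⟨hq, hr⟩ | ⟨hq, hr⟩)
          · rcases List.mem_append.mp hq with hq | hq
            · exact Or.inl ⟨hq, hr⟩
            · obtain ⟨rfl, rfl⟩ : a = u ∧ b = v := by simpa [Prod.ext_iff] using hq
              exact absurd hr hR
          · rcases List.mem_append.mp hq with hq | hq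
            · exact Or.inr ⟨hq, hr⟩
            · obtain ⟨rfl, rfl⟩ : b = u ∧ a = v := by simpa [Prod.ext_iff] using hq
              exact absurd hr hR
    · rw [if_neg (by simp [PySem.Set.contains, hmem, hswapff])]
      have hffadd : PySem.Set.add ff (u, v) = ff ++ [(u, v)] := by
        simp [PySem.Set.add, PySem.Set.contains, hmem]
      rw [hffadd]
      refine ⟨?_, ?_, ?_, ?_, hfsnd, hcs⟩
      · rintro ⟨a, b⟩
        simp only [List.mem_append, List.mem_singleton, hff (a, b)]
        constructor
        · rintro (⟨hq, hnR⟩ | hq)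
          · exact ⟨Or.inl hq, hnR⟩
          · obtain ⟨rfl, rfl⟩ : a = u ∧ b = v := by simpa [Prod.ext_iff] using hq
            exact ⟨Or.inr rfl, hR⟩
        · rintro ⟨hq, hnR⟩
          rcases hq with hq | hq
          · exact Or.inl ⟨hq, hnR⟩
          · exact Or.inr hq
      · exact List.Nodup.append hffnd (List.nodup_singleton _) (by simpa using hmem)
      · simp only [List.length_append, List.length_singleton]
        push_cast
        omega
      · rintro ⟨a, b⟩
        rw [hfs (a, b)]
        constructor
        · rintro (⟨hq, hr⟩ | ⟨hq, hr⟩)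
          · exact Or.inl ⟨by simp [hq], hr⟩
          · exact Or.inr ⟨by simp [hq], hr⟩
        · rintro (⟨hq, hr⟩ | ⟨hq, hr⟩)
          · rcases List.mem_append.mp hq with hq | hq
            · exact Or.inl ⟨hq, hr⟩
            · obtain ⟨rfl, rfl⟩ : a = u ∧ b = v := by simpa [Prod.ext_iff] using hq
              exact absurd hr hR
          · rcases List.mem_append.mp hq with hq | hq
            · exact Or.inr ⟨hq, hr⟩
            · obtain ⟨rfl, rfl⟩ : b = u ∧ a = v := by simpa [Prod.ext_iff] using hq
              exact absurd hr hR

lemma tcFold_inv (links : List (Int × List (Int × Int))) :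
    ∀ (rest seen : List (Int × Int)) st, seen ++ rest = tcEs links → tcInv (tcEs links) seen st →
      tcInv (tcEs links) (seen ++ rest) (rest.foldl (tcStepA (PySem.Dict.ofList links)) st) := by
  intro rest
  induction rest with
  | nil => intro seen st _ h; simpa using h
  | cons p rest ih =>
    intro seen st heq h
    have hp : p ∈ tcEs links := heq ▸ (by simp)
    have hseen : ∀ q ∈ seen, q ∈ tcEs links := fun q hq => heq ▸ (by simp [hq])
    have h' := tcStep_inv links seen p st hp hseen h
    have := ih (seen ++ [p]) (tcStepA (PySem.Dict.ofList links) st p) (by simpa using heq) h'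
    simpa using this

lemma ties_count_eq_foldl (links : List (Int × List (Int × Int))) :
    ties_count links =
      (let st := (tcEs links).foldl (tcStepA (PySem.Dict.ofList links)) (0, 0, [], []);
       (st.1, st.2.1)) := by
  simp only [ties_count, tcEs, List.foldl_flatMap, List.foldl_map]
  rfl

lemma ties_count_alt_eq (links : List (Int × List (Int × Int))) :
    ties_count_alt links =
      (let E := PySem.Set.ofList (tcEs links);
       let recip := E.filter (fun p => PySem.Set.contains E (p.2, p.1));
       ((E.length : Int) - (recip.length : Int),
        PySem.Int.floordiv
          ((recip.length : Int) + ((recip.filter (fun p => p.1 == p.2)).length : Int)) 2)) :=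
  rfl

-- ===== VERDICT (by name: the statement is the Claim_ definition above) =====
theorem ties_count_spec : Claim_equal_ties_count := by
  intro links _
  unfold Spec_ties_count
  have hinit : tcInv (tcEs links) [] (0, 0, [], []) := by
    unfold tcInv
    exact ⟨by simp, by simp, by simp, by simp, by simp, by simp⟩
  have hinv := tcFold_inv links (tcEs links) [] (0, 0, [], []) (by simp) hinit
  simp only [List.nil_append] at hinv
  obtain ⟨hff, hffnd, hcf, hfs, hfsnd, hcs⟩ := hinv
  set st := (tcEs links).foldl (tcStepA (PySem.Dict.ofList links)) (0, 0, [], []) with hst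
  rw [ties_count_eq_foldl, ties_count_alt_eq]
  simp only [← hst]
  set es := tcEs links with hes
  set E := PySem.Set.ofList es with hE
  set recip := E.filter (fun p => PySem.Set.contains E (p.2, p.1)) with hrecip
  have hmemE : ∀ q : Int × Int, q ∈ E ↔ q ∈ es := fun q => PySem.Set.mem_ofList es q
  have hEnd : E.Nodup := PySem.Set.nodup_ofList es
  have hmemrecip : ∀ q : Int × Int, q ∈ recip ↔ q ∈ es ∧ (q.2, q.1) ∈ es := by
    intro q
    rw [hrecip, List.mem_filter]
    simp [PySem.Set.contains, hmemE]
  have hrecipnd : recip.Nodup := List.Nodup.filter _ hEnd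
  -- first component
  have hffperm : st.2.2.1.Perm (E.filter (fun p => !(PySem.Set.contains E (p.2, p.1)))) := by
    refine (List.perm_ext_iff_of_nodup hffnd (List.Nodup.filter _ hEnd)).mpr ?_
    intro q
    rw [hff q, List.mem_filter]
    simp [PySem.Set.contains, hmemE]
  have hsplit : recip.length + (E.filter (fun p => !(PySem.Set.contains E (p.2, p.1)))).length
      = E.length := by
    have h := (List.filter_append_perm (fun p : Int × Int =>
      PySem.Set.contains E (p.2, p.1)) E).length_eq
    rw [List.length_append, ← hrecip] at h
    exact h
  -- second component
  have hfsperm : st.2.2.2.Perm recip := by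
    refine (List.perm_ext_iff_of_nodup hfsnd hrecipnd).mpr ?_
    intro q
    rw [hfs q, hmemrecip q]
    tauto
  have hdiagperm : (st.2.2.2.filter (fun q => q.1 == q.2)).Perm
      (recip.filter (fun q => q.1 == q.2)) := by
    refine (List.perm_ext_iff_of_nodup (List.Nodup.filter _ hfsnd)
      (List.Nodup.filter _ hrecipnd)).mpr ?_
    intro q
    simp only [List.mem_filter, hfsperm.mem_iff]
  refine Prod.ext ?_ ?_
  · show st.1 = (E.length : Int) - (recip.length : Int)
    rw [hcf, hffperm.length_eq]
    omega
  · show st.2.1 = PySem.Int.floordiv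
      ((recip.length : Int) + ((recip.filter (fun p => p.1 == p.2)).length : Int)) 2
    have h2 : 2 * st.2.1 = (recip.length : Int) +
        ((recip.filter (fun p => p.1 == p.2)).length : Int) := by
      rw [hcs, hfsperm.length_eq, hdiagperm.length_eq]
    rw [← h2]
    show st.2.1 = Int.fdiv (2 * st.2.1) 2
    exact (Int.mul_fdiv_cancel_left _ (by norm_num)).symm
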